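-- pv_equiv track=rewrite | github.com/Hakeem-ds/AutoCataloguing | Autoclassification Scheme/streamlit_demo/streamlit_app/src/core/label_map.py | resolve_hierarchical_sys_id
-- ===== SOURCE A (Python) =====
-- from typing import Dict, Any, Optional
--
-- def resolve_hierarchical_sys_id(raw_sys_id: str, valid_folders: set[str]) -> Optional[str]:
--     """
--     Taxonomy-level normalisation:
--     Given a SYSID like "A/B/C/D/E/F", progressively try:
--         A/B/C/D/E/F
--         A/B/C/D/E
--         A/B/C/D
--         A/B/C
--         A/B
--         A
--     Return the first match in `valid_folders`, or None.
--     """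
--     if not isinstance(raw_sys_id, str):
--         return None
--
--     parts = raw_sys_id.split("/")
--
--     for i in range(len(parts), 0, -1):
--         candidate = "/".join(parts[:i])
--         if candidate in valid_folders:
--             return candidate
--
--     return None
-- ===== SOURCE B (Python) =====
-- from typing import Optional
--
-- def resolve_hierarchical_sys_id(raw_sys_id: str, valid_folders: set[str]) -> Optional[str]:
--     """Single pass over the valid-folder set instead of enumerating prefixes:
--     keep the longest folder that is the whole SYSID or a '/'-boundary prefix of it.
--     Correct because A returns the longest such prefix present in the set, and two
--     boundary prefixes of the same string with equal length are equal."""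
--     if not isinstance(raw_sys_id, str):
--         return None
--
--     best = None
--     for folder in valid_folders:
--         if folder == raw_sys_id or (raw_sys_id.startswith(folder)
--                                     and raw_sys_id[len(folder)] == "/"):
--             if best is None or len(best) < len(folder):
--                 best = folder
--     return best
-- ===== Notes on version B (the rewrite author's own statement) =====
-- stated objective: alternative
-- what changed: B inverts the search: instead of generating every '/'-prefix of the SYSID longest-first and probing the set, it makes one pass over valid_folders keeping the longest folder that is a '/'-boundary prefix of the SYSID (no parts list, no join, no prefix enumeration); the result is unique because equal-length prefixes of one string coincide.
import Mathlib
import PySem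

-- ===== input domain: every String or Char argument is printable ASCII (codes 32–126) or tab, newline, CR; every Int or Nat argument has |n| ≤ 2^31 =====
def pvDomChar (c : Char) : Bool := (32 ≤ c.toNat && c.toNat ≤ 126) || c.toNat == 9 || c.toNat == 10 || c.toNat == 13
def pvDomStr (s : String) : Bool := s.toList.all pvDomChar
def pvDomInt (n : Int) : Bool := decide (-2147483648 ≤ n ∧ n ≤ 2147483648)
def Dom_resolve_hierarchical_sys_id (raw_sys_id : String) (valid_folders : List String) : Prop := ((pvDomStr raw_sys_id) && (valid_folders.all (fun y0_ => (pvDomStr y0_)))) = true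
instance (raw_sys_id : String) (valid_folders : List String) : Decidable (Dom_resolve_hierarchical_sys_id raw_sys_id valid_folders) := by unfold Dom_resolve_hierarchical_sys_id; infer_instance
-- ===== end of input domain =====

-- B inverts A's search: one pass over valid_folders keeping the longest folder that is a
-- '/'-boundary prefix of the SYSID, instead of enumerating the SYSID's prefixes longest-first
-- and probing the set; objective: alternative algorithm, no parts list / join / prefix list.

-- ===== PORT A =====
-- A's for-loop over range(len(parts), 0, -1) with early return, as recursion over the index list
def pvLoopA (parts : List String) (valid_folders : List String) : List Int → Option String
  | [] => none
  | i :: rest =>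
    let candidate := PySem.Str.join "/" (PySem.List.slice parts none (some i))
    if valid_folders.contains candidate then some candidate else pvLoopA parts valid_folders rest

def resolve_hierarchical_sys_id (raw_sys_id : String) (valid_folders : List String) : Option String :=
  -- isinstance(raw_sys_id, str) always holds under the type convention, so that guard is vacuous here
  -- raw_sys_id.split("/"): the separator "/" is non-empty, so Python's split never raises
  let parts : List String := (PySem.Chars.splitOn raw_sys_id.toList ['/']).map String.ofList
  pvLoopA parts valid_folders (PySem.List.pyRange (parts.length : Int) 0 (-1))

-- ===== PORT B =====
-- folder == raw_sys_id or (raw_sys_id.startswith(folder) and raw_sys_id[len(folder)] == "/")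
-- (the index is exact: when it is evaluated, startswith holds and folder ≠ raw, so it is in range;
--  pyGet? returns an Option compared against some '/')
def pvIsCand (raw : String) (folder : String) : Bool :=
  folder == raw ||
    (PySem.Chars.startswith raw.toList folder.toList &&
      PySem.List.pyGet? raw.toList (folder.toList.length : Int) == some '/')

-- loop body: `if <cand>: if best is None or len(best) < len(folder): best = folder`
def pvStepB (raw : String) (best : Option String) (folder : String) : Option String :=
  if pvIsCand raw folder then
    match best with
    | none => some folder
    | some b => if b.toList.length < folder.toList.length then some folder else best
  else best

def resolve_hierarchical_sys_id_alt (raw_sys_id : String) (valid_folders : List String) : Option String :=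
  valid_folders.foldl (pvStepB raw_sys_id) none

-- ===== PRECONDITION & SPEC =====
def Spec_resolve_hierarchical_sys_id (raw_sys_id : String) (valid_folders : List String) (out : Option String) : Prop := out = resolve_hierarchical_sys_id_alt raw_sys_id valid_folders
instance (raw_sys_id : String) (valid_folders : List String) (out : Option String) : Decidable (Spec_resolve_hierarchical_sys_id raw_sys_id valid_folders out) := by unfold Spec_resolve_hierarchical_sys_id; infer_instance

-- ===== CLAIM (what is proved, stated in full; the proofs are below) =====
def Claim_equal_resolve_hierarchical_sys_id : Prop := ∀ (raw_sys_id : String) (valid_folders : List String), Dom_resolve_hierarchical_sys_id raw_sys_id valid_folders → Spec_resolve_hierarchical_sys_id raw_sys_id valid_folders (resolve_hierarchical_sys_id raw_sys_id valid_folders)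

-- ===== LEMMAS AND PROOFS =====

-- proof-side reference recursion: try the string, then truncate at the last '/'
def pvTrunc (valid_folders : List String) : Nat → List Char → Option String
  | 0, _ => none
  | fuel + 1, cand =>
    if valid_folders.contains (String.ofList cand) then some (String.ofList cand)
    else
      let idx := PySem.Chars.rfind cand ['/']
      if idx = -1 then none
      else pvTrunc valid_folders fuel (PySem.List.slice cand none (some idx))

-- "boundary prefix": f is cs itself, or a prefix of cs followed by '/'
def pvBPr (cs f : List Char) : Prop :=
  f <+: cs ∧ (f.length = cs.length ∨ cs[f.length]? = some '/')

-- a one-char pattern is a prefix iff it is the head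
lemma pvSinglePrefix (t : List Char) : (['/'] : List Char).isPrefixOf t = true ↔ t.head? = some '/' := by
  cases t with
  | nil => rw [List.isPrefixOf_iff_prefix]; simp
  | cons x r => rw [List.isPrefixOf_iff_prefix]; simp [List.cons_prefix_cons, eq_comm]

lemma pvNoPrefix (t : List Char) (h : '/' ∉ t) : (['/'] : List Char).isPrefixOf t = false := by
  rw [Bool.eq_false_iff]
  intro hp
  have := (pvSinglePrefix t).mp hp
  cases t with
  | nil => simp at this
  | cons x r =>
    simp at this
    exact h (this ▸ List.mem_cons_self)

-- split a list at the LAST occurrence of an element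
lemma pvLastSplit (c : Char) : ∀ (cs : List Char), c ∈ cs → ∃ a b, cs = a ++ c :: b ∧ c ∉ b := by
  intro cs h
  induction cs with
  | nil => cases h
  | cons x rest ih =>
    by_cases hr : c ∈ rest
    · obtain ⟨a, b, hab, hb⟩ := ih hr
      exact ⟨x :: a, b, by simp [hab], hb⟩
    · rcases List.mem_cons.mp h with h1 | h2
      · exact ⟨[], rest, by simp [h1], hr⟩
      · exact absurd h2 hr

-- splitOn.go on a slash-free tail just appends the final piece
lemma pvGoNoSlash : ∀ (fuel : Nat) (l cur : List Char) (acc : List (List Char)),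
    '/' ∉ l → PySem.Chars.splitOn.go ['/'] fuel l cur acc = acc.reverse ++ [cur.reverse ++ l] := by
  intro fuel
  induction fuel with
  | zero => intro l cur acc _; simp [PySem.Chars.splitOn.go]
  | succ f ih =>
    intro l cur acc hl
    cases l with
    | nil => simp [PySem.Chars.splitOn.go]
    | cons c rest =>
      have hc : c ≠ '/' := by intro h; exact hl (h ▸ List.mem_cons_self)
      have hpre : (['/'] : List Char).isPrefixOf (c :: rest) = false :=
        pvNoPrefix _ (by simp [hc.symm]; exact fun h => hl (List.mem_cons_of_mem _ h))
      simp only [PySem.Chars.splitOn.go, hpre]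
      rw [ih rest (c :: cur) acc (fun h => hl (List.mem_cons_of_mem _ h))]
      simp

-- splitOn.go does not depend on the fuel once it exceeds the remaining length
lemma pvGoFuel : ∀ (l : List Char) (f1 f2 : Nat) (cur : List Char) (acc : List (List Char)),
    l.length < f1 → l.length < f2 →
    PySem.Chars.splitOn.go ['/'] f1 l cur acc = PySem.Chars.splitOn.go ['/'] f2 l cur acc := by
  intro l
  induction l with
  | nil =>
    intro f1 f2 cur acc h1 h2
    cases f1 with
    | zero => omega
    | succ g1 =>
      cases f2 with
      | zero => omega
      | succ g2 => simp [PySem.Chars.splitOn.go]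
  | cons c rest ih =>
    intro f1 f2 cur acc h1 h2
    cases f1 with
    | zero => omega
    | succ g1 =>
      cases f2 with
      | zero => omega
      | succ g2 =>
        simp only [PySem.Chars.splitOn.go, List.length_cons, List.drop_succ_cons]
        split
        · exact ih g1 g2 _ _ (by simp at h1; omega) (by simp at h2; omega)
        · exact ih g1 g2 _ _ (by simp at h1; omega) (by simp at h2; omega)

-- splitting off the slash-free piece after the LAST slash
lemma pvGoLast : ∀ (fuel : Nat) (l b cur : List Char) (acc : List (List Char)),
    '/' ∉ b → l.length < fuel →
    PySem.Chars.splitOn.go ['/'] fuel (l ++ '/' :: b) cur acc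
      = PySem.Chars.splitOn.go ['/'] fuel l cur acc ++ [b] := by
  intro fuel
  induction fuel with
  | zero => intro l b cur acc _ h; omega
  | succ f ih =>
    intro l b cur acc hb h
    cases l with
    | nil =>
      have hp : (['/'] : List Char).isPrefixOf ('/' :: b) = true := by
        rw [pvSinglePrefix]; rfl
      simp only [List.nil_append, PySem.Chars.splitOn.go, hp, if_true, List.length_singleton,
        List.drop_succ_cons, List.drop_zero]
      rw [pvGoNoSlash f b [] _ hb]
      simp
    | cons c rest =>
      by_cases hc : c = '/'
      · subst hc
        have hp1 : (['/'] : List Char).isPrefixOf ('/' :: (rest ++ '/' :: b)) = true := by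
          rw [pvSinglePrefix]; rfl
        have hp2 : (['/'] : List Char).isPrefixOf ('/' :: rest) = true := by
          rw [pvSinglePrefix]; rfl
        simp only [List.cons_append, PySem.Chars.splitOn.go, hp1, hp2, if_true,
          List.length_singleton, List.drop_succ_cons, List.drop_zero]
        exact ih rest b [] _ hb (by simp at h; omega)
      · have hp1 : (['/'] : List Char).isPrefixOf (c :: (rest ++ '/' :: b)) = false := by
          rw [Bool.eq_false_iff]
          intro hp
          have := (pvSinglePrefix _).mp hp
          simp at this
          exact hc this
        have hp2 : (['/'] : List Char).isPrefixOf (c :: rest) = false := by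
          rw [Bool.eq_false_iff]
          intro hp
          have := (pvSinglePrefix _).mp hp
          simp at this
          exact hc this
        simp only [List.cons_append, PySem.Chars.splitOn.go, hp1, hp2]
        exact ih rest b (c :: cur) acc hb (by simp at h; omega)

-- splitOn.go never returns the empty list
lemma pvGoNe : ∀ (fuel : Nat) (l cur : List Char) (acc : List (List Char)),
    PySem.Chars.splitOn.go ['/'] fuel l cur acc ≠ [] := by
  intro fuel
  induction fuel with
  | zero => intro l cur acc; simp [PySem.Chars.splitOn.go]
  | succ f ih =>
    intro l cur acc
    cases l with
    | nil => simp [PySem.Chars.splitOn.go]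
    | cons c rest =>
      simp only [PySem.Chars.splitOn.go, List.length_singleton, List.drop_succ_cons,
        List.drop_zero]
      split
      · exact ih _ _ _
      · exact ih _ _ _

lemma pvSplitNoSlash (cs : List Char) (h : '/' ∉ cs) : PySem.Chars.splitOn cs ['/'] = [cs] := by
  unfold PySem.Chars.splitOn
  rw [pvGoNoSlash _ _ _ _ h]; simp

lemma pvSplitLast (a b : List Char) (hb : '/' ∉ b) :
    PySem.Chars.splitOn (a ++ '/' :: b) ['/'] = PySem.Chars.splitOn a ['/'] ++ [b] := by
  unfold PySem.Chars.splitOn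
  rw [pvGoLast _ _ _ _ _ hb (by simp only [List.length_append, List.length_cons]; omega)]
  rw [pvGoFuel a _ (a.length + 1) _ _ (by simp only [List.length_append, List.length_cons]; omega)
    (by omega)]

lemma pvSplitNe (cs : List Char) : PySem.Chars.splitOn cs ['/'] ≠ [] := pvGoNe _ _ _ _

-- join with "/" of an appended final piece
lemma pvJoinAppend (b : List Char) : ∀ (L : List (List Char)), L ≠ [] →
    PySem.Chars.join ['/'] (L ++ [b]) = PySem.Chars.join ['/'] L ++ '/' :: b := by
  intro L
  induction L with
  | nil => intro h; exact absurd rfl h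
  | cons x rest ih =>
    intro _
    cases rest with
    | nil =>
      simp only [List.nil_append, List.cons_append]
      rw [PySem.Chars.join_cons_cons, PySem.Chars.join_singleton, PySem.Chars.join_singleton]
      simp
    | cons y t =>
      have h2 := ih (by simp)
      simp only [List.cons_append] at h2 ⊢
      rw [PySem.Chars.join_cons_cons, PySem.Chars.join_cons_cons, h2]
      simp

-- join undoes splitOn
lemma pvJoinSplit : ∀ (N : Nat) (cs : List Char), cs.length ≤ N →
    PySem.Chars.join ['/'] (PySem.Chars.splitOn cs ['/']) = cs := by
  intro N
  induction N with
  | zero =>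
    intro cs h
    have : cs = [] := List.eq_nil_of_length_eq_zero (Nat.le_zero.mp h)
    subst this
    rw [pvSplitNoSlash [] (by simp), PySem.Chars.join_singleton]
  | succ n ih =>
    intro cs h
    by_cases hs : '/' ∈ cs
    · obtain ⟨a, b, rfl, hb⟩ := pvLastSplit '/' cs hs
      rw [pvSplitLast a b hb, pvJoinAppend _ _ (pvSplitNe a)]
      rw [ih a (by simp only [List.length_append, List.length_cons] at h; omega)]
    · rw [pvSplitNoSlash cs hs, PySem.Chars.join_singleton]

-- rfind of '/' in a slash-free string is -1
lemma pvRfindGoNone (s : List Char) (hs : '/' ∉ s) : ∀ k, PySem.Chars.rfind.go s ['/'] k = -1 := by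
  intro k
  induction k with
  | zero =>
    simp only [PySem.Chars.rfind.go, pvNoPrefix s hs]
    simp
  | succ j ih =>
    have hd : '/' ∉ List.drop (j + 1) s := fun h => hs (List.mem_of_mem_drop h)
    simp only [PySem.Chars.rfind.go, pvNoPrefix _ hd]
    simpa using ih

-- rfind of '/' finds the last slash
lemma pvRfindGoLast (a b : List Char) (hb : '/' ∉ b) :
    ∀ k, a.length ≤ k → PySem.Chars.rfind.go (a ++ '/' :: b) ['/'] k = (a.length : Int) := by
  intro k
  induction k with
  | zero =>
    intro h
    have ha : a = [] := List.eq_nil_of_length_eq_zero (Nat.le_zero.mp h)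
    subst ha
    have hp : (['/'] : List Char).isPrefixOf ('/' :: b) = true := by rw [pvSinglePrefix]; rfl
    simp [PySem.Chars.rfind.go, hp]
  | succ j ih =>
    intro h
    by_cases he : a.length = j + 1
    · have hd : List.drop (j + 1) (a ++ '/' :: b) = '/' :: b := by
        rw [← he]; exact List.drop_left
      have hp : (['/'] : List Char).isPrefixOf (List.drop (j + 1) (a ++ '/' :: b)) = true := by
        rw [hd, pvSinglePrefix]; rfl
      simp only [PySem.Chars.rfind.go, hp, if_true]
      exact_mod_cast congrArg (fun n : Nat => (n : Int)) he.symm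
    · have hlt : a.length ≤ j := by omega
      have hd : '/' ∉ List.drop (j + 1) (a ++ '/' :: b) := by
        intro hm
        rw [List.drop_append] at hm
        rcases List.mem_append.mp hm with h1 | h2
        · rw [List.drop_eq_nil_of_le (by omega : a.length ≤ j + 1)] at h1
          cases h1
        · rw [show j + 1 - a.length = (j - a.length) + 1 from by omega,
            List.drop_succ_cons] at h2
          exact hb (List.mem_of_mem_drop h2)
      simp only [PySem.Chars.rfind.go, pvNoPrefix _ hd]
      simpa using ih hlt

lemma pvRfindNone (s : List Char) (hs : '/' ∉ s) : PySem.Chars.rfind s ['/'] = -1 :=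
  pvRfindGoNone s hs _

lemma pvRfindLast (a b : List Char) (hb : '/' ∉ b) :
    PySem.Chars.rfind (a ++ '/' :: b) ['/'] = (a.length : Int) :=
  pvRfindGoLast a b hb _ (by simp only [List.length_append, List.length_cons]; omega)

-- the descending index list range(n, 0, -1)
lemma pvRangeDesc (n : Nat) :
    PySem.List.pyRange (n : Int) 0 (-1)
      = (List.range n).map (fun k : Nat => ((n : Int) - (k : Int))) := by
  unfold PySem.List.pyRange
  rw [if_neg (by norm_num : ¬ (-1 : Int) = 0)]
  rw [if_neg (by norm_num : ¬ (0 : Int) < -1)]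
  by_cases hn : 0 < n
  · rw [if_pos (by exact_mod_cast hn : (0 : Int) < (n : Int))]
    show List.map _ (List.range ((((n : Int) - 0 + - -1 - 1) / - -1).toNat)) = _
    have hc : (((n : Int) - 0 + - -1 - 1) / - -1).toNat = n := by norm_num
    rw [hc]
    exact List.map_congr_left fun k _ => by ring
  · have : n = 0 := by omega
    subst this
    rw [if_neg (by norm_num)]
    simp

lemma pvRangeDescCons (m : Nat) :
    PySem.List.pyRange ((m + 1 : Nat) : Int) 0 (-1)
      = ((m : Int) + 1) :: PySem.List.pyRange ((m : Nat) : Int) 0 (-1) := by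
  rw [pvRangeDesc, pvRangeDesc, List.range_succ_eq_map]
  simp only [List.map_cons, List.map_map, Nat.cast_zero, sub_zero, List.cons.injEq]
  refine ⟨by push_cast; ring, ?_⟩
  refine List.map_congr_left fun k _ => ?_
  simp only [Function.comp_apply]
  push_cast; ring

-- pvLoopA only looks at the joined candidates; equal candidates give equal runs
lemma pvLoopACongr (vf : List String) : ∀ (idxs : List Int) (parts parts' : List String),
    (∀ i ∈ idxs, PySem.Str.join "/" (PySem.List.slice parts none (some i))
               = PySem.Str.join "/" (PySem.List.slice parts' none (some i))) →
    pvLoopA parts vf idxs = pvLoopA parts' vf idxs := by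
  intro idxs
  induction idxs with
  | nil => intro _ _ _; rfl
  | cons i rest ih =>
    intro parts parts' h
    simp only [pvLoopA, h i List.mem_cons_self]
    rw [ih parts parts' (fun j hj => h j (List.mem_cons_of_mem _ hj))]

-- the slash-free base case: one candidate on each side
lemma pvBase (cs : List Char) (vf : List String) (hs : '/' ∉ cs) (fuel : Nat)
    (hf : cs.length < fuel) :
    pvLoopA ((PySem.Chars.splitOn cs ['/']).map String.ofList) vf
      (PySem.List.pyRange ((((PySem.Chars.splitOn cs ['/']).map String.ofList).length : Nat) : Int) 0 (-1))
      = pvTrunc vf fuel cs := by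
  obtain ⟨f, rfl⟩ : ∃ f, fuel = f + 1 := ⟨fuel - 1, by omega⟩
  rw [pvSplitNoSlash cs hs]
  have hrange : PySem.List.pyRange ((1 : Nat) : Int) 0 (-1) = [(1 : Int)] := by decide
  have hlen : (([cs].map String.ofList).length : Nat) = (1 : Nat) := rfl
  rw [hlen, hrange]
  have hsl : PySem.List.slice ([cs].map String.ofList) none (some 1) = [String.ofList cs] := by
    rw [PySem.List.slice_to _ (by norm_num)]; rfl
  have hcand : PySem.Str.join "/" [String.ofList cs] = String.ofList cs := by
    unfold PySem.Str.join
    simp [PySem.Chars.join_singleton]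
  simp only [pvLoopA, pvTrunc, hsl, hcand]
  by_cases hcont : vf.contains (String.ofList cs) = true
  · rw [if_pos hcont, if_pos hcont]
  · rw [if_neg hcont, if_neg hcont, pvRfindNone cs hs, if_pos rfl]

-- A's parts/join loop equals the rfind truncation recursion
lemma pvMain : ∀ (N : Nat) (cs : List Char) (vf : List String), cs.length ≤ N →
    ∀ fuel, cs.length < fuel →
    pvLoopA ((PySem.Chars.splitOn cs ['/']).map String.ofList) vf
      (PySem.List.pyRange ((((PySem.Chars.splitOn cs ['/']).map String.ofList).length : Nat) : Int) 0 (-1))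
      = pvTrunc vf fuel cs := by
  intro N
  induction N with
  | zero =>
    intro cs vf h fuel hf
    have hnil : cs = [] := List.eq_nil_of_length_eq_zero (Nat.le_zero.mp h)
    subst hnil
    exact pvBase [] vf (by simp) fuel hf
  | succ n ih =>
    intro cs vf h fuel hf
    by_cases hs : '/' ∈ cs
    · obtain ⟨a, b, rfl, hb⟩ := pvLastSplit '/' cs hs
      obtain ⟨f, rfl⟩ : ∃ f, fuel = f + 1 := ⟨fuel - 1, by omega⟩
      rw [pvSplitLast a b hb]
      set m := (PySem.Chars.splitOn a ['/']).length with hm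
      have hplen : (((PySem.Chars.splitOn a ['/']).map String.ofList ++ [String.ofList b]).length : Nat)
          = m + 1 := by simp [hm]
      simp only [List.map_append, List.map_cons, List.map_nil]
      rw [hplen, pvRangeDescCons m]
      have hfull : PySem.Str.join "/"
          (PySem.List.slice ((PySem.Chars.splitOn a ['/']).map String.ofList ++ [String.ofList b])
            none (some ((m : Int) + 1)))
          = String.ofList (a ++ '/' :: b) := by
        have h01 : ((m : Int) + 1) = ((m + 1 : Nat) : Int) := by push_cast; ring
        rw [h01, PySem.List.slice_to _ (by exact_mod_cast Nat.zero_le _), Int.toNat_natCast]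
        rw [List.take_of_length_le (by simp [hm])]
        unfold PySem.Str.join
        have hmap : (((PySem.Chars.splitOn a ['/']).map String.ofList ++ [String.ofList b]).map String.toList)
            = PySem.Chars.splitOn a ['/'] ++ [b] := by
          simp [List.map_map, Function.comp_def]
        rw [hmap]
        rw [show ("/" : String).toList = ['/'] from rfl]
        rw [← pvSplitLast a b hb, pvJoinSplit (a ++ '/' :: b).length _ le_rfl]
      simp only [pvLoopA, pvTrunc, hfull]
      by_cases hcont : vf.contains (String.ofList (a ++ '/' :: b)) = true
      · rw [if_pos hcont, if_pos hcont]
      · rw [if_neg hcont, if_neg hcont]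
        rw [pvRfindLast a b hb]
        rw [if_neg (by omega : ¬ ((a.length : Int) = -1))]
        rw [PySem.List.slice_to _ (by exact_mod_cast Nat.zero_le _ : (0 : Int) ≤ (a.length : Int))]
        rw [Int.toNat_natCast, List.take_left]
        have hcg : ∀ i ∈ PySem.List.pyRange ((m : Nat) : Int) 0 (-1),
            PySem.Str.join "/" (PySem.List.slice
              ((PySem.Chars.splitOn a ['/']).map String.ofList ++ [String.ofList b]) none (some i))
            = PySem.Str.join "/" (PySem.List.slice
              ((PySem.Chars.splitOn a ['/']).map String.ofList) none (some i)) := by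
          intro i hi
          rw [pvRangeDesc] at hi
          simp only [List.mem_map, List.mem_range] at hi
          obtain ⟨k, hk, rfl⟩ := hi
          have h0 : (0 : Int) ≤ (m : Int) - (k : Int) := by omega
          have h1 : ((m : Int) - (k : Int)).toNat ≤ m := by omega
          rw [PySem.List.slice_to _ h0, PySem.List.slice_to _ h0,
            List.take_append_of_le_length (by rw [List.length_map, ← hm]; exact h1)]
        rw [pvLoopACongr vf _ _ _ hcg]
        have hIH := ih a vf
          (by simp only [List.length_append, List.length_cons] at h; omega) f
          (by simp only [List.length_append, List.length_cons] at hf; omega)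
        simpa [hm] using hIH
    · exact pvBase cs vf hs fuel hf

-- ===== the boundary-prefix characterisation relating pvTrunc to B's scan =====

-- pvIsCand decides pvBPr
lemma pvIsCand_iff (raw f : String) : pvIsCand raw f = true ↔ pvBPr raw.toList f.toList := by
  unfold pvIsCand pvBPr
  simp only [Bool.or_eq_true, Bool.and_eq_true, beq_iff_eq, PySem.Chars.startswith_iff,
    PySem.List.pyGet?_natCast]
  constructor
  · rintro (rfl | ⟨hp, hg⟩)
    · exact ⟨List.prefix_refl _, Or.inl rfl⟩
    · exact ⟨hp, Or.inr hg⟩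
  · rintro ⟨hp, (hl | hg)⟩
    · exact Or.inl (by
        have := List.IsPrefix.eq_of_length hp hl
        exact String.toList_injective this)
    · exact Or.inr ⟨hp, hg⟩

lemma pvBPr_len_le {cs f : List Char} (h : pvBPr cs f) : f.length ≤ cs.length :=
  h.1.length_le

lemma pvBPr_self (cs : List Char) : pvBPr cs cs := ⟨List.prefix_refl _, Or.inl rfl⟩

-- two boundary prefixes of equal length are equal
lemma pvBPr_unique {cs f g : List Char} (hf : pvBPr cs f) (hg : pvBPr cs g)
    (h : f.length = g.length) : f = g := by
  have h1 := List.prefix_iff_eq_take.mp hf.1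
  have h2 := List.prefix_iff_eq_take.mp hg.1
  rw [h1, h2, h]

-- boundary prefixes of cs = a ++ '/' :: b ('/' ∉ b) other than cs itself = boundary prefixes of a
lemma pvBPr_step {a b f : List Char} (hb : '/' ∉ b) :
    pvBPr (a ++ '/' :: b) f ∧ f ≠ a ++ '/' :: b ↔ pvBPr a f := by
  constructor
  · rintro ⟨⟨hp, hor⟩, hne⟩
    have hlen : f.length ≤ a.length := by
      by_contra hgt
      replace hgt : a.length < f.length := by omega
      rcases hor with hl | hg
      · exact hne (List.IsPrefix.eq_of_length hp hl)
      · -- (a ++ '/' :: b)[f.length] = '/' with f.length > a.length: slash inside b, contradiction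
        have hlt : f.length < (a ++ '/' :: b).length := by
          rcases List.getElem?_eq_some_iff.mp hg with ⟨hh, _⟩
          exact hh
        have hfl : f.length ≥ a.length + 1 := hgt
        rw [List.getElem?_append_right (by omega : a.length ≤ f.length)] at hg
        obtain ⟨k, hk⟩ : ∃ k, f.length - a.length = k + 1 := ⟨f.length - a.length - 1, by omega⟩
        rw [hk] at hg
        simp only [List.getElem?_cons_succ] at hg
        exact hb (List.mem_of_getElem? hg)
    have hpa : f <+: a := by
      have := List.prefix_iff_eq_take.mp hp
      rw [List.take_append_of_le_length hlen] at this
      exact this ▸ List.take_prefix _ _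
    refine ⟨hpa, ?_⟩
    by_cases he : f.length = a.length
    · exact Or.inl he
    · have hlt : f.length < a.length := by omega
      rcases hor with hl | hg
      · exfalso
        simp only [List.length_append, List.length_cons] at hl
        omega
      · right
        rw [List.getElem?_append_left (by omega)] at hg
        exact hg
  · rintro ⟨hp, hor⟩
    have hlen : f.length ≤ a.length := hp.length_le
    refine ⟨⟨hp.trans (List.prefix_append _ _), ?_⟩, ?_⟩
    · right
      rcases hor with hl | hg
      · rw [List.getElem?_append_right (le_of_eq hl.symm), hl]
        simp
      · rw [List.getElem?_append_left (by
          rcases List.getElem?_eq_some_iff.mp hg with ⟨hh, _⟩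
          exact hh)]
        exact hg
    · intro hfe
      have : f.length = (a ++ '/' :: b).length := by rw [hfe]
      simp only [List.length_append, List.length_cons] at this
      omega

-- in a slash-free string the only boundary prefix is the string itself
lemma pvBPr_noslash {cs f : List Char} (hs : '/' ∉ cs) : pvBPr cs f ↔ f = cs := by
  constructor
  · rintro ⟨hp, (hl | hg)⟩
    · exact List.IsPrefix.eq_of_length hp hl
    · exfalso
      rcases List.getElem?_eq_some_iff.mp hg with ⟨hh, hv⟩
      exact hs (hv ▸ List.getElem_mem _)
  · rintro rfl; exact pvBPr_self _

-- pvTrunc characterisation: it returns exactly the longest member of vf that is a boundary prefix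
lemma pvTruncSpec : ∀ (N : Nat) (cs : List Char), cs.length ≤ N → ∀ (vf : List String) (fuel : Nat),
    cs.length < fuel →
    (pvTrunc vf fuel cs = none → ∀ f ∈ vf, ¬ pvBPr cs f.toList) ∧
    (∀ c, pvTrunc vf fuel cs = some c → c ∈ vf ∧ pvBPr cs c.toList ∧
      ∀ f ∈ vf, pvBPr cs f.toList → f.toList.length ≤ c.toList.length) := by
  intro N
  induction N with
  | zero =>
    intro cs h vf fuel hf
    have hnil : cs = [] := List.eq_nil_of_length_eq_zero (Nat.le_zero.mp h)
    subst hnil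
    obtain ⟨g, rfl⟩ : ∃ g, fuel = g + 1 := ⟨fuel - 1, by omega⟩
    simp only [pvTrunc]
    by_cases hcont : vf.contains (String.ofList []) = true
    · rw [if_pos hcont]
      refine ⟨(by intro h'; cases h'), ?_⟩
      rintro c hc
      injection hc with hc
      subst hc
      refine ⟨(List.contains_iff_mem).mp hcont, pvBPr_self _, ?_⟩
      intro f _ hbp
      exact pvBPr_len_le hbp
    · rw [if_neg hcont, pvRfindNone [] (by simp), if_pos rfl]
      refine ⟨?_, by rintro c hc; cases hc⟩
      intro _ f hfm hbp
      rw [pvBPr_noslash (by simp)] at hbp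
      have : f = String.ofList [] := by
        apply String.toList_injective; rw [hbp, String.toList_ofList]
      exact absurd (List.contains_iff_mem.mpr (this ▸ hfm)) (by simpa using hcont)
  | succ n ih =>
    intro cs h vf fuel hf
    obtain ⟨g, rfl⟩ : ∃ g, fuel = g + 1 := ⟨fuel - 1, by omega⟩
    simp only [pvTrunc]
    by_cases hcont : vf.contains (String.ofList cs) = true
    · rw [if_pos hcont]
      refine ⟨(by intro h'; cases h'), ?_⟩
      rintro c hc
      injection hc with hc
      subst hc
      refine ⟨List.contains_iff_mem.mp hcont, ?_, ?_⟩
      · show pvBPr cs (String.ofList cs).toList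
        rw [String.toList_ofList]
        exact pvBPr_self cs
      · intro f _ hbp
        have := pvBPr_len_le hbp
        rwa [String.toList_ofList]
    · rw [if_neg hcont]
      have hnotmem : String.ofList cs ∉ vf := fun hm =>
        absurd (List.contains_iff_mem.mpr hm) (by simpa using hcont)
      by_cases hs : '/' ∈ cs
      · obtain ⟨a, b, rfl, hb⟩ := pvLastSplit '/' cs hs
        rw [pvRfindLast a b hb, if_neg (by omega : ¬ ((a.length : Int) = -1))]
        rw [PySem.List.slice_to _ (by exact_mod_cast Nat.zero_le _ : (0 : Int) ≤ (a.length : Int)),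
          Int.toNat_natCast, List.take_left]
        have hIH := ih a (by simp only [List.length_append, List.length_cons] at h; omega) vf g
          (by simp only [List.length_append, List.length_cons] at hf; omega)
        -- f ∈ vf is a boundary prefix of cs iff of a (it cannot be cs itself: cs ∉ vf)
        have hequiv : ∀ f, f ∈ vf → (pvBPr (a ++ '/' :: b) f.toList ↔ pvBPr a f.toList) := by
          intro f hfm
          constructor
          · intro hbp
            refine (pvBPr_step hb).mp ⟨hbp, ?_⟩
            intro he
            exact hnotmem (by
              have : f = String.ofList (a ++ '/' :: b) := by
                apply String.toList_injective; rw [he, String.toList_ofList]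
              exact this ▸ hfm)
          · intro hbp
            exact ((pvBPr_step hb).mpr hbp).1
        constructor
        · intro hn f hfm hbp
          exact hIH.1 hn f hfm ((hequiv f hfm).mp hbp)
        · intro c hc
          obtain ⟨hcm, hcbp, hcmax⟩ := hIH.2 c hc
          refine ⟨hcm, ((pvBPr_step hb).mpr hcbp).1, ?_⟩
          intro f hfm hbp
          exact hcmax f hfm ((hequiv f hfm).mp hbp)
      · rw [pvRfindNone cs hs, if_pos rfl]
        refine ⟨?_, by rintro c hc; cases hc⟩
        intro _ f hfm hbp
        rw [pvBPr_noslash hs] at hbp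
        exact hnotmem (by
          have : f = String.ofList cs := by
            apply String.toList_injective; rw [hbp, String.toList_ofList]
          exact this ▸ hfm)

-- once the B-fold holds some value it never drops back to none
lemma pvFoldSome (raw : String) : ∀ (l : List String) (b : String),
    ∃ c, l.foldl (pvStepB raw) (some b) = some c := by
  intro l
  induction l with
  | nil => intro b; exact ⟨b, rfl⟩
  | cons f rest ih =>
    intro b
    have hstep : ∃ b', pvStepB raw (some b) f = some b' := by
      unfold pvStepB
      by_cases h1 : pvIsCand raw f = true
      · rw [if_pos h1]
        by_cases h2 : b.toList.length < f.toList.length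
        · exact ⟨f, by
            change (if b.toList.length < f.toList.length then some f else some b) = some f
            rw [if_pos h2]⟩
        · exact ⟨b, by
            change (if b.toList.length < f.toList.length then some f else some b) = some b
            rw [if_neg h2]⟩
      · exact ⟨b, by rw [if_neg h1]⟩
    obtain ⟨b', hb'⟩ := hstep
    simp only [List.foldl_cons, hb']
    exact ih b'

-- B-fold characterisation, all accumulators at once
lemma pvFoldSpec (raw : String) : ∀ (l : List String) (b : Option String),
    (l.foldl (pvStepB raw) b = none → b = none ∧ ∀ f ∈ l, ¬ pvBPr raw.toList f.toList) ∧
    (∀ c, l.foldl (pvStepB raw) b = some c →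
      ((c ∈ l ∧ pvBPr raw.toList c.toList) ∨ b = some c) ∧
      (∀ f ∈ l, pvBPr raw.toList f.toList → f.toList.length ≤ c.toList.length) ∧
      (∀ b', b = some b' → b'.toList.length ≤ c.toList.length)) := by
  intro l
  induction l with
  | nil =>
    intro b
    refine ⟨fun h => ⟨h, by simp⟩, ?_⟩
    intro c hc
    exact ⟨Or.inr hc, by simp, fun b' hb' => by rw [hb'] at hc; injection hc with hc; rw [hc]⟩
  | cons f rest ih =>
    intro b
    simp only [List.foldl_cons]
    constructor
    · intro hn
      by_cases hbp : pvIsCand raw f = true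
      · exfalso
        have hstep : ∃ x, pvStepB raw b f = some x := by
          unfold pvStepB
          rw [if_pos hbp]
          cases b with
          | none => exact ⟨f, rfl⟩
          | some b0 =>
            by_cases h : b0.toList.length < f.toList.length
            · exact ⟨f, by
                change (if b0.toList.length < f.toList.length then some f else some b0) = some f
                rw [if_pos h]⟩
            · exact ⟨b0, by
                change (if b0.toList.length < f.toList.length then some f else some b0) = some b0
                rw [if_neg h]⟩
        obtain ⟨x, hx⟩ := hstep
        rw [hx] at hn
        obtain ⟨c, hc⟩ := pvFoldSome raw rest x
        rw [hn] at hc; cases hc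
      · have hstep : pvStepB raw b f = b := by unfold pvStepB; rw [if_neg hbp]
        rw [hstep] at hn
        obtain ⟨hb, hrest⟩ := (ih b).1 hn
        refine ⟨hb, ?_⟩
        intro g hg
        rcases List.mem_cons.mp hg with rfl | hg'
        · intro hbpr; exact hbp ((pvIsCand_iff raw g).mpr hbpr)
        · exact hrest g hg'
    · intro c hc
      by_cases hbp : pvIsCand raw f = true
      · have hbpr := (pvIsCand_iff raw f).mp hbp
        -- the step produced some x with x ∈ {f} ∪ unwrap b, BP x if x = f, and len ≥ both
        have hstep : (pvStepB raw b f = some f ∧ (∀ b', b = some b' → b'.toList.length ≤ f.toList.length)) ∨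
            (∃ b0, b = some b0 ∧ pvStepB raw b f = some b0 ∧ f.toList.length ≤ b0.toList.length) := by
          unfold pvStepB
          rw [if_pos hbp]
          cases b with
          | none => exact Or.inl ⟨rfl, by rintro b' ⟨⟩⟩
          | some b0 =>
            by_cases hlt : b0.toList.length < f.toList.length
            · refine Or.inl ⟨by
                change (if b0.toList.length < f.toList.length then some f else some b0) = some f
                rw [if_pos hlt], ?_⟩
              rintro b' hb'
              injection hb' with hb'
              subst hb'
              omega
            · refine Or.inr ⟨b0, rfl, ?_, by omega⟩
              change (if b0.toList.length < f.toList.length then some f else some b0) = some b0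
              rw [if_neg hlt]
        rcases hstep with ⟨hsf, hble⟩ | ⟨b0, rfl, hsb, hfle⟩
        · rw [hsf] at hc
          obtain ⟨hor, hmax, hacc⟩ := (ih (some f)).2 c hc
          have hflen : f.toList.length ≤ c.toList.length := hacc f rfl
          refine ⟨?_, ?_, ?_⟩
          · rcases hor with ⟨hcm, hcbp⟩ | hbc
            · exact Or.inl ⟨List.mem_cons_of_mem _ hcm, hcbp⟩
            · injection hbc with hbc; subst hbc
              exact Or.inl ⟨List.mem_cons_self, hbpr⟩
          · intro g hg hgbp
            rcases List.mem_cons.mp hg with rfl | hg'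
            · exact hflen
            · exact hmax g hg' hgbp
          · intro b' hb'
            exact le_trans (hble b' hb') hflen
        · rw [hsb] at hc
          obtain ⟨hor, hmax, hacc⟩ := (ih (some b0)).2 c hc
          have hblen : b0.toList.length ≤ c.toList.length := hacc b0 rfl
          refine ⟨?_, ?_, ?_⟩
          · rcases hor with ⟨hcm, hcbp⟩ | hbc
            · exact Or.inl ⟨List.mem_cons_of_mem _ hcm, hcbp⟩
            · exact Or.inr hbc
          · intro g hg hgbp
            rcases List.mem_cons.mp hg with rfl | hg'
            · exact le_trans hfle hblen
            · exact hmax g hg' hgbp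
          · intro b' hb'
            injection hb' with hb'; subst hb'; exact hblen
      · have hstep : pvStepB raw b f = b := by unfold pvStepB; rw [if_neg hbp]
        rw [hstep] at hc
        obtain ⟨hor, hmax, hacc⟩ := (ih b).2 c hc
        refine ⟨?_, ?_, hacc⟩
        · rcases hor with ⟨hcm, hcbp⟩ | hbc
          · exact Or.inl ⟨List.mem_cons_of_mem _ hcm, hcbp⟩
          · exact Or.inr hbc
        · intro g hg hgbp
          rcases List.mem_cons.mp hg with rfl | hg'
          · exact absurd ((pvIsCand_iff raw g).mpr hgbp) (by simpa using hbp)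
          · exact hmax g hg' hgbp

-- ===== VERDICT (by name: the statement is the Claim_ definition above) =====
theorem resolve_hierarchical_sys_id_spec : Claim_equal_resolve_hierarchical_sys_id := by
  intro raw vf _
  unfold Spec_resolve_hierarchical_sys_id resolve_hierarchical_sys_id resolve_hierarchical_sys_id_alt
  rw [pvMain raw.toList.length raw.toList vf le_rfl _ (Nat.lt_succ_self _)]
  obtain ⟨hTn, hTs⟩ := pvTruncSpec raw.toList.length raw.toList le_rfl vf _ (Nat.lt_succ_self _)
  obtain ⟨hFn, hFs⟩ := pvFoldSpec raw vf none
  cases hT : pvTrunc vf (raw.toList.length + 1) raw.toList with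
  | none =>
    cases hF : vf.foldl (pvStepB raw) none with
    | none => rfl
    | some c =>
      obtain ⟨hor, _, _⟩ := hFs c hF
      rcases hor with ⟨hcm, hcbp⟩ | hbc
      · exact absurd hcbp (hTn hT c hcm)
      · cases hbc
  | some c =>
    obtain ⟨hcm, hcbp, hcmax⟩ := hTs c hT
    cases hF : vf.foldl (pvStepB raw) none with
    | none =>
      exact absurd hcbp ((hFn hF).2 c hcm)
    | some c' =>
      obtain ⟨hor, hmax, _⟩ := hFs c' hF
      rcases hor with ⟨hcm', hcbp'⟩ | hbc
      · have h1 := hcmax c' hcm' hcbp'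
        have h2 := hmax c hcm hcbp
        have hlen : c.toList.length = c'.toList.length := by omega
        have := pvBPr_unique hcbp hcbp' hlen
        rw [String.toList_injective this]
      · cases hbc
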